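-- pv_equiv track=rewrite | github.com/pkang0831/fromFatToFit_v2 | scripts/seo_retrofit/build_cross_platform_packages_20260422.py | build_x_thread
-- ===== SOURCE A (Python) =====
-- def safe_truncate(s: str, n: int) -> str:
--     if len(s) <= n:
--         return s
--     cut = s[:n].rsplit(" ", 1)[0]
--     return cut + "…"
--
-- def build_x_thread(seo_title: str, primary_kw: str, paragraphs: list[str], medium_url_placeholder: str) -> list[str]:
--     """Build an X/Twitter thread (8-12 tweets, each <=275 chars to leave
--     breathing room for thread numbering 'X/Y')."""
--     if not paragraphs:
--         return ["(no body content)"]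
--
--     # Tweet 1: hook with kw front-loaded.
--     hook = paragraphs[0]
--     hook = safe_truncate(hook, 270)
--
--     tweets: list[str] = [hook]
--
--     # Tweets 2-N: split each subsequent paragraph into <=275 char chunks,
--     # but don't combine paragraphs (preserves rhythm).
--     target_count = 9  # body tweets after hook
--     consumed = 0
--     for p in paragraphs[1:]:
--         if consumed >= target_count:
--             break
--         if len(p) <= 275:
--             tweets.append(p)
--             consumed += 1
--         else:
--             chunks = []
--             words = p.split()
--             buf = ""
--             for w in words:
--                 cand = (buf + " " + w).strip()
--                 if len(cand) > 270:
--                     chunks.append(buf.strip())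
--                     buf = w
--                 else:
--                     buf = cand
--             if buf:
--                 chunks.append(buf.strip())
--             for ch in chunks:
--                 if consumed >= target_count:
--                     break
--                 tweets.append(ch)
--                 consumed += 1
--
--     # Final CTA tweet (links go in last tweet only)
--     cta = f"Full piece, with the rest of the work: {medium_url_placeholder}"
--     tweets.append(safe_truncate(cta, 270))
--
--     # Re-number with X/Y for clarity (optional in copy; we just include in markdown)
--     return tweets
-- ===== SOURCE B (Python) =====
-- def safe_truncate(s: str, n: int) -> str:
--     if len(s) <= n:
--         return s
--     cut = s[:n].rsplit(" ", 1)[0]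
--     return cut + "…"
--
-- def _pack(p: str) -> list[str]:
--     """Greedy word-packing into <=270-char chunks, written recursively."""
--     def go(words, buf):
--         if not words:
--             return [buf.strip()] if buf else []
--         w, rest = words[0], words[1:]
--         cand = (buf + " " + w).strip()
--         if len(cand) > 270:
--             return [buf.strip()] + go(rest, w)
--         return go(rest, cand)
--     return go(p.split(), "")
--
-- def build_x_thread(seo_title: str, primary_kw: str, paragraphs: list[str], medium_url_placeholder: str) -> list[str]:
--     if not paragraphs:
--         return ["(no body content)"]
--     body: list[str] = []
--     for p in paragraphs[1:]:
--         body += [p] if len(p) <= 275 else _pack(p)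
--     cta = f"Full piece, with the rest of the work: {medium_url_placeholder}"
--     return [safe_truncate(paragraphs[0], 270)] + body[:9] + [safe_truncate(cta, 270)]
-- ===== Notes on version B (the rewrite author's own statement) =====
-- stated objective: simpler
-- what changed: B drops the consumed/target_count counter threaded through nested loops with early breaks: it builds the flat list of all body tweets ([p] for short paragraphs, recursive greedy word-packing for long ones) and enforces the 9-body-tweet budget with a single [:9] slice.
import Mathlib
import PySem

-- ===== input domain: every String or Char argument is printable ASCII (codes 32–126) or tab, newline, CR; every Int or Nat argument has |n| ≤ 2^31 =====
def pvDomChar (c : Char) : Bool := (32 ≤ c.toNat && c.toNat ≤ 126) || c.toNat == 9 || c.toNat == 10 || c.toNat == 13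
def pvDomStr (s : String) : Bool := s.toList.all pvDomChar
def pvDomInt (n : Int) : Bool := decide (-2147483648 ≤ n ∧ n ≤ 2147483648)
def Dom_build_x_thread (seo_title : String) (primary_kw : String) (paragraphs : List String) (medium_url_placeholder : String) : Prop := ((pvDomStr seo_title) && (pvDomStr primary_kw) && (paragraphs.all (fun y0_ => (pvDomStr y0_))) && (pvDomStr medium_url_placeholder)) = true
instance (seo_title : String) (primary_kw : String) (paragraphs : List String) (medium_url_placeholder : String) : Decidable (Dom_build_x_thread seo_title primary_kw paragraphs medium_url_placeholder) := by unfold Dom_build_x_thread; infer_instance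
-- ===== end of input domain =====

-- B replaces A's consumed-counter with nested break-driven loops by one flat list of body tweets and a take-9 slice (objective: simpler).


-- ===== PORT A =====
-- shared helper: safe_truncate (identical in Source A and Source B); s[:n].rsplit(" ", 1)[0] is
-- ported by hand via rfind: with a one-char separator and maxsplit 1, rsplit(" ",1)[0] is
-- the prefix before the LAST space, or the whole string if there is no space — exact.
def pvSafeTruncate (s : List Char) (n : Nat) : List Char :=
  if s.length ≤ n then s
  else
    let t := s.take n
    let r := PySem.Chars.rfind t [' ']
    let cut := if r = -1 then t else t.take r.toNat
    cut ++ ['…']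

-- A's inner chunk-building loop: foldl over words with (chunks, buf) state, then flush buf.
def pvStepA (st : List (List Char) × List Char) (w : List Char) : List (List Char) × List Char :=
  let cand := PySem.Chars.strip (st.2 ++ [' '] ++ w)
  if 270 < cand.length then (st.1 ++ [PySem.Chars.strip st.2], w) else (st.1, cand)

def pvFlushA (st : List (List Char) × List Char) : List (List Char) :=
  if st.2 ≠ [] then st.1 ++ [PySem.Chars.strip st.2] else st.1

def pvChunksA (p : List Char) : List (List Char) :=
  pvFlushA ((PySem.Chars.split₀ p).foldl pvStepA ([], []))

-- A's inner append loop over chunks with the consumed-budget break.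
def pvAppendA : List (List Char) → List (List Char) → Nat → List (List Char) × Nat
  | [], tweets, consumed => (tweets, consumed)
  | ch :: rest, tweets, consumed =>
    if 9 ≤ consumed then (tweets, consumed)
    else pvAppendA rest (tweets ++ [ch]) (consumed + 1)

-- A's outer loop over paragraphs[1:] threading (tweets, consumed), break at the budget.
def pvOuterA : List (List Char) → List (List Char) → Nat → List (List Char)
  | [], tweets, _ => tweets
  | p :: ps, tweets, consumed =>
    if 9 ≤ consumed then tweets
    else if p.length ≤ 275 then pvOuterA ps (tweets ++ [p]) (consumed + 1)
    else
      let r := pvAppendA (pvChunksA p) tweets consumed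
      pvOuterA ps r.1 r.2

def pvCta (medium_url_placeholder : String) : List Char :=
  "Full piece, with the rest of the work: ".toList ++ medium_url_placeholder.toList

def build_x_thread (seo_title : String) (primary_kw : String) (paragraphs : List String) (medium_url_placeholder : String) : List String :=
  match paragraphs.map String.toList with
  | [] => ["(no body content)"]
  | p0 :: rest =>
    let hook := pvSafeTruncate p0 270
    let tweets := pvOuterA rest [hook] 0
    (tweets ++ [pvSafeTruncate (pvCta medium_url_placeholder) 270]).map String.mk

-- ===== PORT B =====
-- Source B's recursive greedy packer go(words, buf).
def pvPackB : List (List Char) → List Char → List (List Char)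
  | [], buf => if buf ≠ [] then [PySem.Chars.strip buf] else []
  | w :: rest, buf =>
    let cand := PySem.Chars.strip (buf ++ [' '] ++ w)
    if 270 < cand.length then PySem.Chars.strip buf :: pvPackB rest w
    else pvPackB rest cand

-- one paragraph's contribution to the body list
def pvItemB (p : List Char) : List (List Char) :=
  if p.length ≤ 275 then [p] else pvPackB (PySem.Chars.split₀ p) []

def build_x_thread_alt (seo_title : String) (primary_kw : String) (paragraphs : List String) (medium_url_placeholder : String) : List String :=
  match paragraphs.map String.toList with
  | [] => ["(no body content)"]
  | p0 :: rest =>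
    let body := rest.flatMap pvItemB
    ([pvSafeTruncate p0 270] ++ body.take 9
      ++ [pvSafeTruncate (pvCta medium_url_placeholder) 270]).map String.mk

-- ===== PRECONDITION & SPEC =====
def Spec_build_x_thread (seo_title : String) (primary_kw : String) (paragraphs : List String) (medium_url_placeholder : String) (out : List String) : Prop := out = build_x_thread_alt seo_title primary_kw paragraphs medium_url_placeholder
instance (seo_title : String) (primary_kw : String) (paragraphs : List String) (medium_url_placeholder : String) (out : List String) : Decidable (Spec_build_x_thread seo_title primary_kw paragraphs medium_url_placeholder out) := by unfold Spec_build_x_thread; infer_instance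

-- ===== CLAIM (what is proved, stated in full; the proofs are below) =====
def Claim_equal_build_x_thread : Prop := ∀ (seo_title : String) (primary_kw : String) (paragraphs : List String) (medium_url_placeholder : String), Dom_build_x_thread seo_title primary_kw paragraphs medium_url_placeholder → Spec_build_x_thread seo_title primary_kw paragraphs medium_url_placeholder (build_x_thread seo_title primary_kw paragraphs medium_url_placeholder)

-- ===== LEMMAS AND PROOFS =====

-- A's foldl-with-flush chunker equals B's recursive packer.
theorem packA_eq_packB (words : List (List Char)) (chunks : List (List Char)) (buf : List Char) :
    pvFlushA (words.foldl pvStepA (chunks, buf)) = chunks ++ pvPackB words buf := by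
  induction words generalizing chunks buf with
  | nil =>
    simp only [List.foldl_nil, pvFlushA, pvPackB]
    split_ifs <;> simp
  | cons w rest ih =>
    by_cases h : 270 < (PySem.Chars.strip (buf ++ ' ' :: w)).length
    · have hs : pvStepA (chunks, buf) w = (chunks ++ [PySem.Chars.strip buf], w) := by
        simp [pvStepA, h]
      rw [List.foldl_cons, hs, ih]
      simp [pvPackB, h]
    · have hs : pvStepA (chunks, buf) w = (chunks, PySem.Chars.strip (buf ++ ' ' :: w)) := by
        simp [pvStepA, h]
      rw [List.foldl_cons, hs, ih]
      simp [pvPackB, h]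

theorem chunksA_eq (p : List Char) : pvChunksA p = pvPackB (PySem.Chars.split₀ p) [] := by
  simpa [pvChunksA] using packA_eq_packB (PySem.Chars.split₀ p) [] []

-- A's budgeted chunk-append loop, in closed form.
theorem appendA_eq (chunks tweets : List (List Char)) (c : Nat) :
    pvAppendA chunks tweets c
      = (tweets ++ chunks.take (9 - c), c + min chunks.length (9 - c)) := by
  induction chunks generalizing tweets c with
  | nil => simp [pvAppendA]
  | cons ch rest ih =>
    by_cases h : 9 ≤ c
    · have : 9 - c = 0 := by omega
      simp [pvAppendA, h, this]
    · have h9 : 9 - c = (8 - c) + 1 := by omega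
      have h8 : 9 - (c + 1) = 8 - c := by omega
      rw [pvAppendA, if_neg h, ih, h9, h8]
      rw [Prod.mk.injEq]
      refine ⟨by simp, ?_⟩
      simp only [List.length_cons]
      omega

-- A's outer loop equals prefix ++ take-(budget) of the flat body list.
theorem outerA_eq (ps : List (List Char)) (tweets : List (List Char)) (c : Nat) :
    pvOuterA ps tweets c = tweets ++ (ps.flatMap pvItemB).take (9 - c) := by
  induction ps generalizing tweets c with
  | nil => simp [pvOuterA]
  | cons p ps ih =>
    by_cases h : 9 ≤ c
    · have : 9 - c = 0 := by omega
      simp [pvOuterA, h, this]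
    · rw [pvOuterA, if_neg h]
      by_cases hl : p.length ≤ 275
      · rw [if_pos hl, ih]
        have h9 : 9 - c = (9 - (c + 1)) + 1 := by omega
        simp [pvItemB, hl, h9]
      · rw [if_neg hl]
        simp only [appendA_eq, chunksA_eq]
        rw [ih]
        have hitem : pvItemB p = pvPackB (PySem.Chars.split₀ p) [] := by
          simp [pvItemB, hl]
        rw [List.flatMap_cons, hitem, List.take_append, List.append_assoc]
        congr 2
        congr 1
        omega

-- ===== VERDICT (by name: the statement is the Claim_ definition above) =====
theorem build_x_thread_spec : Claim_equal_build_x_thread := by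
  intro seo_title primary_kw paragraphs medium_url_placeholder _
  unfold Spec_build_x_thread build_x_thread build_x_thread_alt
  cases h : paragraphs.map String.toList with
  | nil => rfl
  | cons p0 rest =>
    simp [outerA_eq]
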